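-- pv_equiv track=rewrite | github.com/hackmaster0110/Sentiment-Analysis-Using-Amazon-Reviews | helper.py | skipgram
-- ===== SOURCE A (Python) =====
-- def skipgram(window_size,arr):
--     """Function for performing skip gram windowing
--
--     Parameters
--     ----------
--     window_size : integer
--         Size of the window.
--     arr : list
--         string encoded using intgers
--
--     Returns
--     -------
--     type list
--         Returns list of tuple containing center word and context words
--
--     """
--     max_index = len(arr) - 1
--     if max_index <= 0:
--         return None
--     elif max_index+1 < window_size:
--         window_size = max_index
--     assert len(arr) > 0,"List must not be empty"
--     assert isinstance(window_size,int) is True,"window_size must be an integer"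
--     tmp = window_size
--     rel = []
--     for index,elem in enumerate(arr):
--         center_word = elem
--         val = index
--         val2 = index
--         new = []
--         for itm in range(window_size):
--
--             if val > 0:
--                 val -= 1
--                 new.append(arr[val])
--
--             if val2 < max_index:
--                 val2 += 1
--                 new.append(arr[val2])
--         rel.append((arr[index],new))
--
--     return rel
-- ===== SOURCE B (Python) =====
-- def skipgram(window_size, arr):
--     """Skip-gram windowing via slice-then-merge: for each center, take the
--     reversed left slice and the right slice, then merge them L1,R1,L2,R2,..."""
--     max_index = len(arr) - 1
--     if max_index <= 0:
--         return None
--     if max_index + 1 < window_size: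
--         window_size = max_index
--     rel = []
--     for index in range(len(arr)):
--         lefts = list(reversed(arr[max(0, index - window_size):index]))
--         rights = arr[index + 1:index + 1 + window_size]
--         new = []
--         for d in range(window_size):
--             if d < len(lefts):
--                 new.append(lefts[d])
--             if d < len(rights):
--                 new.append(rights[d])
--         rel.append((arr[index], new))
--     return rel
-- ===== Notes on version B (the rewrite author's own statement) =====
-- stated objective: alternative
-- what changed: A walks two stateful indices (val, val2) inside the window loop; B instead builds the reversed left slice and the right slice once per center word and merges the two slices positionally, keeping the same interleaved L1,R1,L2,R2 order.
import Mathlib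
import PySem

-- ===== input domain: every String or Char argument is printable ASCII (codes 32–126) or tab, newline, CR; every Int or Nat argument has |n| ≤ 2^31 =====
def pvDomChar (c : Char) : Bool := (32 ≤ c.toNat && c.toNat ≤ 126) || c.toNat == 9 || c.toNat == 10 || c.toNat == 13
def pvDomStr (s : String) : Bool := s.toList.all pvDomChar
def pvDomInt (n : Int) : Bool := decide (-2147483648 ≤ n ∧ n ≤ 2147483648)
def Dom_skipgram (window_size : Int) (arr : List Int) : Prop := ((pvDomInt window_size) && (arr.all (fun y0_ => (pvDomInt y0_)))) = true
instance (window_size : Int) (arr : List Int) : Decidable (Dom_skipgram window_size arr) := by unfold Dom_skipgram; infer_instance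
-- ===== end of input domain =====

-- B builds each context by slicing the two sides once and merging the slices, instead of
-- A's stateful index walk; same return value everywhere (objective: alternative decomposition).

-- ===== PORT A =====
-- one iteration of A's inner 'for itm in range(window_size)' loop over the state (val, val2, new)
def skipgramAStep (arr : List Int) (maxIndex : Int) (s : Int × Int × List Int) (_itm : Int) : Int × Int × List Int :=
  let val := s.1
  let val2 := s.2.1
  let new := s.2.2
  let p1 : Int × List Int :=
    if 0 < val then (val - 1, new ++ [PySem.List.pyGetD arr (val - 1) 0]) else (val, new)
  let p2 : Int × List Int :=
    if val2 < maxIndex then (val2 + 1, p1.2 ++ [PySem.List.pyGetD arr (val2 + 1) 0]) else (val2, p1.2)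
  (p1.1, p2.1, p2.2)


def skipgram (window_size : Int) (arr : List Int) : Option (List (Int × List Int)) :=
  let max_index : Int := (arr.length : Int) - 1
  if max_index ≤ 0 then none
  else
    let window_size := if max_index + 1 < window_size then max_index else window_size
    some ((PySem.List.enumerate arr 0).foldl (fun rel p =>
      let index := p.1
      let new := ((PySem.List.pyRange 0 window_size 1).foldl (skipgramAStep arr max_index)
        (index, index, [])).2.2
      rel ++ [(PySem.List.pyGetD arr index 0, new)]) [])

-- ===== PORT B =====
-- one iteration of B's merge loop 'for d in range(window_size)'
def skipgramMerge (lefts rights : List Int) (new : List Int) (d : Int) : List Int :=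
  let new := if d < (lefts.length : Int) then new ++ [PySem.List.pyGetD lefts d 0] else new
  if d < (rights.length : Int) then new ++ [PySem.List.pyGetD rights d 0] else new


def skipgram_alt (window_size : Int) (arr : List Int) : Option (List (Int × List Int)) :=
  let max_index : Int := (arr.length : Int) - 1
  if max_index ≤ 0 then none
  else
    let w := if max_index + 1 < window_size then max_index else window_size
    some ((PySem.List.pyRange 0 (arr.length : Int) 1).foldl (fun rel index =>
      let lefts := (PySem.List.slice arr (some (max 0 (index - w))) (some index)).reverse
      let rights := PySem.List.slice arr (some (index + 1)) (some (index + 1 + w))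
      let new := (PySem.List.pyRange 0 w 1).foldl (skipgramMerge lefts rights) []
      rel ++ [(PySem.List.pyGetD arr index 0, new)]) [])

-- ===== PRECONDITION & SPEC =====
def Spec_skipgram (window_size : Int) (arr : List Int) (out : Option (List (Int × List Int))) : Prop := out = skipgram_alt window_size arr
instance (window_size : Int) (arr : List Int) (out : Option (List (Int × List Int))) : Decidable (Spec_skipgram window_size arr out) := by unfold Spec_skipgram; infer_instance

-- ===== CLAIM (what is proved, stated in full; the proofs are below) =====
def Claim_equal_skipgram : Prop := ∀ (window_size : Int) (arr : List Int), Dom_skipgram window_size arr → Spec_skipgram window_size arr (skipgram window_size arr)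

-- ===== LEMMAS AND PROOFS =====

theorem lefts_length (arr : List Int) (i w : Int) (hi0 : 0 ≤ i) (hin : i < (arr.length : Int))
    (hw : 0 ≤ w) :
    ((PySem.List.slice arr (some (max 0 (i - w))) (some i)).reverse).length = (min i w).toNat := by
  rw [PySem.List.slice_toNat (ha := by omega) (hb := by omega)]
  simp
  omega

theorem lefts_getD (arr : List Int) (i w : Int) (hi0 : 0 ≤ i) (hin : i < (arr.length : Int))
    (k : Nat) (hk : (k : Int) < min i w) :
    ((PySem.List.slice arr (some (max 0 (i - w))) (some i)).reverse).getD k 0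
      = arr.getD (i - 1 - k).toNat 0 := by
  rw [PySem.List.slice_toNat (ha := by omega) (hb := by omega)]
  rw [List.getD_eq_getElem _ _ (by simp; omega), List.getElem_reverse]
  rw [List.getElem_take, List.getElem_drop]
  rw [List.getD_eq_getElem _ _ (by simp; omega : (i - 1 - k).toNat < arr.length)]
  congr 1
  simp
  omega

theorem rights_length (arr : List Int) (i w : Int) (hi0 : 0 ≤ i) (hin : i < (arr.length : Int))
    (hw : 0 ≤ w) :
    (PySem.List.slice arr (some (i + 1)) (some (i + 1 + w))).length
      = (min w ((arr.length : Int) - 1 - i)).toNat := by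
  rw [PySem.List.slice_toNat (ha := by omega) (hb := by omega)]
  simp
  omega

theorem rights_getD (arr : List Int) (i w : Int) (hi0 : 0 ≤ i) (hin : i < (arr.length : Int))
    (k : Nat) (hk : (k : Int) < min w ((arr.length : Int) - 1 - i)) :
    (PySem.List.slice arr (some (i + 1)) (some (i + 1 + w))).getD k 0
      = arr.getD (i + 1 + k).toNat 0 := by
  rw [PySem.List.slice_toNat (ha := by omega) (hb := by omega)]
  rw [List.getD_eq_getElem _ _ (by simp; omega)]
  rw [List.getElem_take, List.getElem_drop]
  rw [List.getD_eq_getElem _ _ (by omega : (i + 1 + k).toNat < arr.length)]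
  congr 1
  omega

-- the inner loops agree: A's state after k steps of its walk, with its 'new' equal to B's merge of the two slices
theorem inner_eq (arr : List Int) (i w : Int) (hi0 : 0 ≤ i) (hin : i < (arr.length : Int))
    (k : Nat) (hk : (k : Int) ≤ w) :
    (PySem.List.pyRange 0 (k : Int) 1).foldl (skipgramAStep arr ((arr.length : Int) - 1)) (i, i, [])
      = (max (i - k) 0, min (i + k) ((arr.length : Int) - 1),
         (PySem.List.pyRange 0 (k : Int) 1).foldl
           (skipgramMerge ((PySem.List.slice arr (some (max 0 (i - w))) (some i)).reverse)
                          (PySem.List.slice arr (some (i + 1)) (some (i + 1 + w)))) []) := by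
  induction k with
  | zero =>
    rw [PySem.List.pyRange_one_eq_nil (by omega)]
    simp only [List.foldl_nil, Nat.cast_zero, Prod.mk.injEq]
    exact ⟨by omega, by omega, trivial⟩
  | succ k ih =>
    have hk' : (k : Int) ≤ w := by push_cast at hk ⊢; omega
    have hw0 : (0:Int) ≤ w := by omega
    have h1 : ((k + 1 : Nat) : Int) = (k : Int) + 1 := by push_cast; ring
    rw [h1, PySem.List.pyRange_one_succ_right (by positivity), List.foldl_append,
        List.foldl_append, ih hk']
    simp only [List.foldl_cons, List.foldl_nil]
    have eL : ∀ _ : (k:Int) < i,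
        PySem.List.pyGetD arr (max (i - (k:Int)) 0 - 1) 0
          = PySem.List.pyGetD ((PySem.List.slice arr (some (max 0 (i - w))) (some i)).reverse) (k:Int) 0 := by
      intro hL
      rw [PySem.List.pyGetD_natCast, lefts_getD arr i w hi0 hin k (by push_cast at hk; omega)]
      rw [PySem.List.pyGetD_eq_getElem arr 0 (by omega) (by omega)]
      rw [List.getD_eq_getElem _ _ (by omega)]
      congr 1
      omega
    have eR : ∀ _ : (k:Int) < (arr.length : Int) - 1 - i,
        PySem.List.pyGetD arr (min (i + (k:Int)) ((arr.length : Int) - 1) + 1) 0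
          = PySem.List.pyGetD (PySem.List.slice arr (some (i + 1)) (some (i + 1 + w))) (k:Int) 0 := by
      intro hR
      rw [PySem.List.pyGetD_natCast, rights_getD arr i w hi0 hin k (by push_cast at hk; omega)]
      rw [PySem.List.pyGetD_eq_getElem arr 0 (by omega) (by omega)]
      rw [List.getD_eq_getElem _ _ (by omega)]
      congr 1
      omega
    simp only [skipgramAStep, skipgramMerge]
    rw [lefts_length arr i w hi0 hin hw0, rights_length arr i w hi0 hin hw0]
    have hkw : (k : Int) < w := by push_cast at hk; omega
    split_ifs <;>
      (dsimp only; simp only [Prod.mk.injEq]) <;>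
      first
        | (exfalso; omega)
        | (refine ⟨by omega, by omega, ?_⟩;
           first
             | trivial
             | (rw [eL (by omega), eR (by omega)])
             | (rw [eL (by omega)])
             | (rw [eR (by omega)]))

-- ===== VERDICT (by name: the statement is the Claim_ definition above) =====
theorem skipgram_spec : Claim_equal_skipgram := by
  intro window_size arr _hdom
  unfold Spec_skipgram skipgram skipgram_alt
  by_cases h0 : (arr.length : Int) - 1 ≤ 0
  · simp only [if_pos h0]
  · simp only [if_neg h0]
    congr 1
    rw [PySem.List.enumerate_eq_map_pyRange arr 0, List.foldl_map]
    simp only [PySem.List.len_eq]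
    refine PySem.List.foldl_congr_mem _ _ _ _ ?_
    intro acc j hj
    rw [PySem.List.mem_pyRange_one] at hj
    obtain ⟨hj0, hjn⟩ := hj
    congr 2
    by_cases hWn : (if (arr.length : Int) - 1 + 1 < window_size then (arr.length : Int) - 1 else window_size) < 0
    · rw [PySem.List.pyRange_one_eq_nil (by omega)]
      rfl
    · have hW0 : 0 ≤ (if (arr.length : Int) - 1 + 1 < window_size then (arr.length : Int) - 1 else window_size) := by omega
      have hrange : PySem.List.pyRange 0 (if (arr.length : Int) - 1 + 1 < window_size then (arr.length : Int) - 1 else window_size) 1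
          = PySem.List.pyRange 0 (((if (arr.length : Int) - 1 + 1 < window_size then (arr.length : Int) - 1 else window_size).toNat : Nat) : Int) 1 := by
        rw [Int.toNat_of_nonneg hW0]
      rw [hrange,
          inner_eq arr j (if (arr.length : Int) - 1 + 1 < window_size then (arr.length : Int) - 1 else window_size) hj0 hjn
            (if (arr.length : Int) - 1 + 1 < window_size then (arr.length : Int) - 1 else window_size).toNat
            (by omega)]
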